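-- pv_equiv track=rewrite | github.com/srinadhg/Learnings | activitySelection.py | max_visitable_events
-- ===== SOURCE A (Python) =====
-- def max_visitable_events(events):
--     # Step 1: Sort events by their end times
--     events.sort(key=lambda x: x[1])
--     n = len(events)
--
--     # Step 2: Precompute P[], where P[i] is the index of last non-overlapping event with i
--     P = [-1] * n
--     for i in range(1, n):
--         # Binary search to find the latest event that ends before events[i][0] (start time of i)
--         low, high = 0, i - 1
--         while low <= high:
--             mid = (low + high) // 2
--             if events[mid][1] <= events[i][0]:
--                 P[i] = mid
--                 low = mid + 1
--             else:
--                 high = mid - 1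
--
--     # Step 3: DP array for maximum number of events
--     dp = [0] * n
--     dp[0] = 1  # First event can always be attended
--
--     for i in range(1, n):
--         # Case 1: Include current event
--         include = 1 + (dp[P[i]] if P[i] != -1 else 0)
--         # Case 2: Exclude current event
--         exclude = dp[i - 1]
--         # Take the maximum of both cases
--         dp[i] = max(include, exclude)
--
--     return dp[-1]  # The maximum number of events
-- ===== SOURCE B (Python) =====
-- def max_visitable_events(events):
--     # greedy earliest-end scan; mutates events in place (sort) like the original
--     events.sort(key=lambda x: x[1])
--     count = 1
--     last_end = events[0][1]
--     for start, end in events[1:]: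
--         if start >= last_end:
--             count += 1
--             last_end = end
--     return count
-- ===== Notes on version B (the rewrite author's own statement) =====
-- stated objective: faster
-- what changed: Replaced the binary-search predecessor table plus DP array by the classic earliest-end greedy single scan keeping only a count and the last selected end time.
import Mathlib
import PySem

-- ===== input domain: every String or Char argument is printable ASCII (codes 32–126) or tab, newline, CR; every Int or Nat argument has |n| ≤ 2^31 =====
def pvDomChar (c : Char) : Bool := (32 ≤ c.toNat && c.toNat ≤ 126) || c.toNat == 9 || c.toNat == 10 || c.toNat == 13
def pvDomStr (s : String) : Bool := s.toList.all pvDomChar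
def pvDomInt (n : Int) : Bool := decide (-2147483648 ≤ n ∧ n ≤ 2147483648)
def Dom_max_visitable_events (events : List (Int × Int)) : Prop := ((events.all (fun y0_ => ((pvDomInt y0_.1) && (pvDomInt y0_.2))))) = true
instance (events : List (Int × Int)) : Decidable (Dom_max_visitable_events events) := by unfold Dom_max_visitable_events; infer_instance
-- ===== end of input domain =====

-- B replaces A's binary-search predecessor table + DP array by the classic earliest-end greedy
-- single scan (faster by a constant factor); both mutate the argument in Python (in-place sort) —
-- the equivalence proved here is about the return value only.


-- ===== PORT A =====
-- events.sort(key=lambda x: x[1])  (shared by both ports: the identical first line of both Pythons)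
def pvSortEnd (events : List (Int × Int)) : List (Int × Int) :=
  PySem.List.sorted events (fun x => x.2)

-- events[k]; every access in A is in range, so a default is never read
def pvEv (l : List (Int × Int)) (k : Nat) : Int × Int := l.getD k (0, 0)

-- the inner 'while low <= high' binary search; p is the running P[i]
def pvBS (l : List (Int × Int)) (s : Int) (low high p : Int) : Int :=
  if h : low ≤ high then
    let mid := PySem.Int.floordiv (low + high) 2
    if (pvEv l mid.toNat).2 ≤ s then pvBS l s (mid + 1) high mid
    else pvBS l s low (mid - 1) p
  else p
termination_by (high + 1 - low).toNat
decreasing_by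
  · have hb := PySem.Int.floordiv_two_mid_bounds h; omega
  · have hb := PySem.Int.floordiv_two_mid_bounds h; omega

-- P[i] after the loop body for index i ≥ 1
def pvPentry (l : List (Int × Int)) (i : Nat) : Int :=
  pvBS l (pvEv l i).1 0 ((i : Int) - 1) (-1)

-- the array P: starts as [-1]*n, entry i (i ≥ 1) set by the binary search
def pvP (l : List (Int × Int)) : List Int :=
  (List.range l.length).map (fun i => if i = 0 then -1 else pvPentry l i)

-- one iteration of the dp loop (index i ≥ 1), appending dp[i]
def pvDPstep (P : List Int) (dp : List Int) (i : Nat) : List Int :=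
  dp ++ [max (1 + (if P.getD i 0 ≠ -1 then dp.getD (P.getD i 0).toNat 0 else 0))
             (dp.getD (i - 1) 0)]

def max_visitable_events (events : List (Int × Int)) : Int :=
  let l := pvSortEnd events
  let n := l.length
  if n = 0 then 0  -- Python raises IndexError here (dp[0] on empty dp); excluded by Pre_
  else
    let P := pvP l
    let dp := (List.range (n - 1)).foldl (fun dp j => pvDPstep P dp (j + 1)) [1]
    PySem.List.pyGetD dp (-1) 0  -- dp[-1]

-- ===== PORT B =====
-- loop body: if start >= last_end: count += 1; last_end = end
def pvGreedyStep (st : Int × Int) (ev : Int × Int) : Int × Int :=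
  if ev.1 ≥ st.2 then (st.1 + 1, ev.2) else st

def max_visitable_events_alt (events : List (Int × Int)) : Int :=
  match pvSortEnd events with
  | [] => 0  -- Python raises IndexError here (events[0]); excluded by Pre_
  | e0 :: rest => (rest.foldl pvGreedyStep (1, e0.2)).1

-- ===== PRECONDITION & SPEC =====
-- A raises IndexError on the empty list (dp[0] on an empty dp); B also raises there (events[0]).
def Pre_max_visitable_events (events : List (Int × Int)) : Prop := events ≠ []
instance (events : List (Int × Int)) : Decidable (Pre_max_visitable_events events) := by
  unfold Pre_max_visitable_events; infer_instance
def pvWitness_max_visitable_events : (List (Int × Int)) := [(0, 1), (1, 2)]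

def Spec_max_visitable_events (events : List (Int × Int)) (out : Int) : Prop := out = max_visitable_events_alt events
instance (events : List (Int × Int)) (out : Int) : Decidable (Spec_max_visitable_events events out) := by unfold Spec_max_visitable_events; infer_instance

-- ===== CLAIM (what is proved, stated in full; the proofs are below) =====
def Claim_equal_max_visitable_events : Prop := ∀ (events : List (Int × Int)), Dom_max_visitable_events events → Pre_max_visitable_events events → Spec_max_visitable_events events (max_visitable_events events)

-- ===== LEMMAS AND PROOFS =====

theorem pvBS_correct (l : List (Int × Int)) (s : Int) (N : Nat) (hN : N ≤ l.length)
    (hmono : ∀ j k : Nat, j ≤ k → k < l.length → (pvEv l j).2 ≤ (pvEv l k).2) :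
    ∀ low high p : Int, 0 ≤ low → high < (N : Int) → p < low →
    (p = -1 ∨ (0 ≤ p ∧ p < (N : Int) ∧ (pvEv l p.toNat).2 ≤ s)) →
    (∀ k : Nat, (k : Int) < N → (pvEv l k).2 ≤ s → ((k : Int) ≤ p ∨ (low ≤ (k : Int) ∧ (k : Int) ≤ high))) →
    (pvBS l s low high p = -1 ∨
      (0 ≤ pvBS l s low high p ∧ pvBS l s low high p < (N : Int) ∧
        (pvEv l (pvBS l s low high p).toNat).2 ≤ s)) ∧
    (∀ k : Nat, (k : Int) < N → (pvEv l k).2 ≤ s → (k : Int) ≤ pvBS l s low high p) := by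
  intro low high p
  fun_induction pvBS l s low high p with
  | case1 low high p h mid hpred ih =>
    intro hlow hhigh hplow hp hcov
    have hb := PySem.Int.floordiv_two_mid_bounds h
    apply ih
    · omega
    · exact hhigh
    · omega
    · right
      refine ⟨by omega, by omega, hpred⟩
    · intro k hk hks
      rcases hcov k hk hks with h1 | h2
      · left; omega
      · by_cases hkm : (k : Int) ≤ mid
        · left; exact hkm
        · right; omega
  | case2 low high p h mid hpred ih =>
    intro hlow hhigh hplow hp hcov
    have hb := PySem.Int.floordiv_two_mid_bounds h
    apply ih
    · exact hlow
    · omega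
    · exact hplow
    · exact hp
    · intro k hk hks
      rcases hcov k hk hks with h1 | h2
      · left; exact h1
      · by_cases hkm : (k : Int) ≤ mid - 1
        · right; omega
        · -- k ≥ mid, so pred mid would hold, contradiction
          exfalso
          have hmk : mid.toNat ≤ k := by omega
          have hkl : k < l.length := by omega
          have := hmono mid.toNat k hmk hkl
          have hmt : ((mid.toNat : Int)) = mid := by omega
          apply hpred
          calc (pvEv l mid.toNat).2 ≤ (pvEv l k).2 := this
            _ ≤ s := hks
  | case3 low high p h =>
    intro hlow hhigh hplow hp hcov
    refine ⟨hp, ?_⟩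
    intro k hk hks
    rcases hcov k hk hks with h1 | h2
    · exact h1
    · omega


-- proof-side views of the two loops
def pvDPfold (P : List Int) (j : Nat) : List Int :=
  (List.range j).foldl (fun dp j => pvDPstep P dp (j + 1)) [1]

theorem pvDPfold_succ (P : List Int) (j : Nat) :
    pvDPfold P (j + 1) = pvDPstep P (pvDPfold P j) (j + 1) := by
  simp [pvDPfold, List.range_succ]

def pvG (l : List (Int × Int)) (j : Nat) : Int × Int :=
  (l.tail.take j).foldl pvGreedyStep (1, (pvEv l 0).2)

theorem pvG_succ (l : List (Int × Int)) (j : Nat) (h : j + 1 < l.length) :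
    pvG l (j + 1) = pvGreedyStep (pvG l j) (pvEv l (j + 1)) := by
  have hj : j < l.tail.length := by simp [List.length_tail]; omega
  have htk : l.tail.take (j + 1) = l.tail.take j ++ [l.tail[j]] := by
    rw [List.take_add_one]; simp [List.getElem?_eq_getElem hj]
  have hev : l.tail[j] = pvEv l (j + 1) := by
    have : l.tail[j] = l[j + 1]'h := by
      simp [List.getElem_tail]
    rw [this, pvEv, List.getD_eq_getElem l (0, 0) h]
  rw [pvG, pvG, htk, List.foldl_append, hev]
  rfl

theorem pvP_getD (l : List (Int × Int)) (i : Nat) (h : i < l.length) (h0 : i ≠ 0) :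
    (pvP l).getD i 0 = pvPentry l i := by
  simp [pvP, List.getD, h, h0]

theorem pvInv (l : List (Int × Int))
    (hmono : ∀ j k : Nat, j ≤ k → k < l.length → (pvEv l j).2 ≤ (pvEv l k).2) :
    ∀ j, j < l.length →
      (pvDPfold (pvP l) j).length = j + 1 ∧
      (∀ a b : Nat, a ≤ b → b ≤ j →
        (pvDPfold (pvP l) j).getD a 0 ≤ (pvDPfold (pvP l) j).getD b 0) ∧
      (pvDPfold (pvP l) j).getD j 0 = (pvG l j).1 ∧
      (∃ jj : Nat, jj ≤ j ∧ (pvEv l jj).2 = (pvG l j).2 ∧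
        (pvDPfold (pvP l) j).getD jj 0 = (pvG l j).1) ∧
      (∀ k : Nat, k ≤ j → (pvEv l k).2 < (pvG l j).2 →
        (pvDPfold (pvP l) j).getD k 0 < (pvG l j).1) ∧
      1 ≤ (pvG l j).1 := by
  intro j
  induction j with
  | zero =>
    intro _
    refine ⟨rfl, ?_, rfl, ⟨0, le_rfl, rfl, rfl⟩, ?_, le_rfl⟩
    · intro a b hab hb
      have ha0 : a = 0 := by omega
      have hb0 : b = 0 := by omega
      subst ha0; subst hb0; exact le_rfl
    · intro k hk hlt
      have hk0 : k = 0 := by omega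
      subst hk0
      exact absurd hlt (lt_irrefl _)
  | succ j ih =>
    intro hj1
    have hj : j < l.length := by omega
    obtain ⟨hlen, hmon, hcur, ⟨jj, hjjle, hjjE, hjjdp⟩, hlt, hc1⟩ := ih hj
    have hPi : (pvP l).getD (j + 1) 0 = pvPentry l (j + 1) := pvP_getD l (j + 1) hj1 (by omega)
    have hbs := pvBS_correct l (pvEv l (j + 1)).1 (j + 1) (by omega) hmono 0
        (((j + 1 : Nat) : Int) - 1) (-1)
        le_rfl (by push_cast; omega) (by omega) (Or.inl rfl)
        (fun k hk hks => Or.inr ⟨by omega, by omega⟩)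
    rw [show pvBS l (pvEv l (j + 1)).1 0 (((j + 1 : Nat) : Int) - 1) (-1) = pvPentry l (j + 1)
          from rfl] at hbs
    have hstep : pvDPfold (pvP l) (j + 1) =
        pvDPfold (pvP l) j ++
          [max (1 + (if pvPentry l (j + 1) ≠ -1 then
                      (pvDPfold (pvP l) j).getD (pvPentry l (j + 1)).toNat 0 else 0))
               ((pvDPfold (pvP l) j).getD j 0)] := by
      rw [pvDPfold_succ]; unfold pvDPstep; rw [hPi, Nat.add_sub_cancel]
    have hGs : pvG l (j + 1) = pvGreedyStep (pvG l j) (pvEv l (j + 1)) := pvG_succ l j hj1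
    have happ : ∀ (v : Int) (k : Nat), k ≤ j →
        (pvDPfold (pvP l) j ++ [v]).getD k 0 = (pvDPfold (pvP l) j).getD k 0 := by
      intro v k hk
      exact List.getD_append _ _ 0 k (by omega)
    have hlast : ∀ v : Int, (pvDPfold (pvP l) j ++ [v]).getD (j + 1) 0 = v := by
      intro v
      rw [← hlen]
      simp [List.getD]
    by_cases hsel : (pvEv l (j + 1)).1 ≥ (pvG l j).2
    · -- greedy selects event j+1
      have hg : pvG l (j + 1) = ((pvG l j).1 + 1, (pvEv l (j + 1)).2) := by
        rw [hGs]; simp [pvGreedyStep, hsel]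
      have hjr : ((jj : Int)) ≤ pvPentry l (j + 1) :=
        hbs.2 jj (by push_cast; omega) (by rw [hjjE]; exact hsel)
      have hr0 : (0 : Int) ≤ pvPentry l (j + 1) := le_trans (Int.natCast_nonneg jj) hjr
      rcases hbs.1 with hr1 | ⟨_, hrlt, hrpred⟩
      · omega
      have hrj : (pvPentry l (j + 1)).toNat ≤ j := by push_cast at hrlt; omega
      have hdpr : (pvDPfold (pvP l) j).getD (pvPentry l (j + 1)).toNat 0 = (pvG l j).1 := by
        have h1 := hmon (pvPentry l (j + 1)).toNat j hrj le_rfl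
        have h2 := hmon jj (pvPentry l (j + 1)).toNat (by omega) hrj
        omega
      have hval : max (1 + (if pvPentry l (j + 1) ≠ -1 then
            (pvDPfold (pvP l) j).getD (pvPentry l (j + 1)).toNat 0 else 0))
          ((pvDPfold (pvP l) j).getD j 0) = (pvG l j).1 + 1 := by
        rw [if_pos (by omega), hdpr, hcur]; omega
      rw [hstep, hval]
      refine ⟨by simp [hlen], ?_, ?_, ?_, ?_, ?_⟩
      · intro a b hab hb
        by_cases hbj : b ≤ j
        · rw [happ _ a (by omega), happ _ b hbj]; exact hmon a b hab hbj
        · have hb1 : b = j + 1 := by omega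
          subst hb1
          rw [hlast]
          by_cases haj : a ≤ j
          · rw [happ _ a haj]
            have := hmon a j haj le_rfl
            omega
          · have : a = j + 1 := by omega
            subst this; rw [hlast]
      · rw [hlast, hg]
      · exact ⟨j + 1, le_rfl, by rw [hg], by rw [hlast, hg]⟩
      · intro k hk hkE
        rw [hg] at hkE
        by_cases hkj : k ≤ j
        · rw [happ _ k hkj, hg]
          have := hmon k j hkj le_rfl
          omega
        · have : k = j + 1 := by omega
          subst this
          exact absurd hkE (lt_irrefl _)
      · rw [hg]; omega
    · -- greedy skips event j+1
      have hg : pvG l (j + 1) = pvG l j := by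
        rw [hGs]; simp [pvGreedyStep, hsel]
      have hinc : 1 + (if pvPentry l (j + 1) ≠ -1 then
          (pvDPfold (pvP l) j).getD (pvPentry l (j + 1)).toNat 0 else 0) ≤ (pvG l j).1 := by
        rcases hbs.1 with hr1 | ⟨hr0, hrlt, hrpred⟩
        · rw [if_neg (by omega)]; omega
        · have hrj : (pvPentry l (j + 1)).toNat ≤ j := by push_cast at hrlt; omega
          have hE : (pvEv l (pvPentry l (j + 1)).toNat).2 < (pvG l j).2 :=
            lt_of_le_of_lt hrpred (by omega)
          have := hlt (pvPentry l (j + 1)).toNat hrj hE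
          rw [if_pos (by omega)]
          omega
      have hval : max (1 + (if pvPentry l (j + 1) ≠ -1 then
            (pvDPfold (pvP l) j).getD (pvPentry l (j + 1)).toNat 0 else 0))
          ((pvDPfold (pvP l) j).getD j 0) = (pvG l j).1 := by
        rw [hcur]; omega
      rw [hstep, hval, hg]
      refine ⟨by simp [hlen], ?_, by rw [hlast], ?_, ?_, hc1⟩
      · intro a b hab hb
        by_cases hbj : b ≤ j
        · rw [happ _ a (by omega), happ _ b hbj]; exact hmon a b hab hbj
        · have hb1 : b = j + 1 := by omega
          subst hb1
          rw [hlast]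
          by_cases haj : a ≤ j
          · rw [happ _ a haj]
            have := hmon a j haj le_rfl
            omega
          · have : a = j + 1 := by omega
            subst this; rw [hlast]
      · exact ⟨jj, by omega, hjjE, by rw [happ _ jj hjjle]; exact hjjdp⟩
      · intro k hk hkE
        by_cases hkj : k ≤ j
        · rw [happ _ k hkj]; exact hlt k hkj hkE
        · have hkeq : k = j + 1 := by omega
          subst hkeq
          exfalso
          have := hmono jj (j + 1) (by omega) hj1
          rw [hjjE] at this
          omega

-- ===== VERDICT (by name: the statement is the Claim_ definition above) =====
theorem max_visitable_events_spec : Claim_equal_max_visitable_events := by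
  unfold Claim_equal_max_visitable_events
  intro events _ hpre
  show max_visitable_events events = max_visitable_events_alt events
  have hlne : pvSortEnd events ≠ [] := by
    intro hnil
    exact hpre ((PySem.List.sorted_eq_nil_iff events (fun x => x.2) false).mp hnil)
  have hn : 0 < (pvSortEnd events).length := List.length_pos_of_ne_nil hlne
  have hmono : ∀ j k : Nat, j ≤ k → k < (pvSortEnd events).length →
      (pvEv (pvSortEnd events) j).2 ≤ (pvEv (pvSortEnd events) k).2 := by
    have hpw := PySem.List.sorted_pairwise events (fun x => x.2)
    have hL : (PySem.List.sorted events fun x => x.2) = pvSortEnd events := rfl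
    rw [hL, List.pairwise_iff_getElem] at hpw
    intro j k hjk hk
    rcases lt_or_eq_of_le hjk with h | h
    · have := hpw j k (by omega) hk h
      unfold pvEv
      rw [List.getD_eq_getElem _ _ (show j < (pvSortEnd events).length by omega),
          List.getD_eq_getElem _ _ hk]
      exact this
    · subst h; exact le_rfl
  have hinv := pvInv (pvSortEnd events) hmono ((pvSortEnd events).length - 1) (by omega)
  -- A's result is dp[n-1]
  have hA : max_visitable_events events =
      (pvDPfold (pvP (pvSortEnd events)) ((pvSortEnd events).length - 1)).getD
        ((pvSortEnd events).length - 1) 0 := by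
    have hdef : max_visitable_events events =
        (if (pvSortEnd events).length = 0 then 0 else
          PySem.List.pyGetD
            (pvDPfold (pvP (pvSortEnd events)) ((pvSortEnd events).length - 1)) (-1) 0) := rfl
    rw [hdef, if_neg (by omega)]
    have hdplen := hinv.1
    have hdpne : pvDPfold (pvP (pvSortEnd events)) ((pvSortEnd events).length - 1) ≠ [] := by
      intro hnil; rw [hnil] at hdplen; simp at hdplen
    rw [PySem.List.pyGetD_neg_one _ 0 hdpne, List.getLast_eq_getElem hdpne,
        List.getD_eq_getElem _ 0 (by omega)]
    congr 1
    omega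
  -- B's result is the greedy fold over the whole tail
  have hB : max_visitable_events_alt events =
      (pvG (pvSortEnd events) ((pvSortEnd events).length - 1)).1 := by
    obtain ⟨e0, rest, hcons⟩ : ∃ e0 rest, pvSortEnd events = e0 :: rest := by
      cases hl : pvSortEnd events with
      | nil => exact absurd hl hlne
      | cons a t => exact ⟨a, t, rfl⟩
    have hdef : max_visitable_events_alt events =
        (rest.foldl pvGreedyStep (1, e0.2)).1 := by
      unfold max_visitable_events_alt
      rw [hcons]
    rw [hdef, pvG, hcons]
    simp [pvEv]
  rw [hA, hB]
  exact hinv.2.2.1
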